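-- pv_equiv track=rewrite | github.com/Ocrim93/HackerRank-Solutions | findTheSequenceSum.py | getSequenceSum
-- ===== SOURCE A (Python) =====
-- def getSequenceSum(i, j, k):
-- 	sum = i
-- 	while i != j:
-- 		i += 1
-- 		sum += i
--
-- 	while j != k:
-- 		j -= 1
-- 		sum += j
-- 	return sum
-- ===== SOURCE B (Python) =====
-- def getSequenceSum(i, j, k):
--     # sum i..j ascending plus (j-1) down to k, via arithmetic-series closed forms
--     return (i + j) * (j - i + 1) // 2 + (k + j - 1) * (j - k) // 2
-- ===== Notes on version B (the rewrite author's own statement) =====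
-- stated objective: alternative
-- what changed: Replaced both counting loops by the arithmetic-series closed form (no iteration).
import Mathlib
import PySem

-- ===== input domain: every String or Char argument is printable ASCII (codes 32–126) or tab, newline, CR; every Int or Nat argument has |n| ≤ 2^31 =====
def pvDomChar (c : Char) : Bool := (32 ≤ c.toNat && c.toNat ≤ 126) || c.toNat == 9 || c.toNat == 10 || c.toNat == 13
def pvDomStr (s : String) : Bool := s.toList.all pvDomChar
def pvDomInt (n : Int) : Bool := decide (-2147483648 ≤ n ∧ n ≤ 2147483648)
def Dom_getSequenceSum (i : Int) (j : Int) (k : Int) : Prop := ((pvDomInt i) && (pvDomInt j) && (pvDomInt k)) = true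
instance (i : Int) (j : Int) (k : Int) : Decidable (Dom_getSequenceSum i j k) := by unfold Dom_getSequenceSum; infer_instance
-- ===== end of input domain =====

-- B replaces A's two counting loops by arithmetic-series closed forms.

-- ===== PORT A =====
-- fuel = exact number of iterations left when the loop terminates (i ≤ j resp. k ≤ j);
-- on inputs where Python's loop never terminates (excluded by Pre_) the fuel runs out.
def pvLoopUp : Nat → Int → Int → Int → Int
  | fuel, i, j, sum =>
    if i ≠ j then
      match fuel with
      | 0 => sum
      | Nat.succ n => pvLoopUp n (i + 1) j (sum + (i + 1))
    else sum

def pvLoopDown : Nat → Int → Int → Int → Int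
  | fuel, j, k, sum =>
    if j ≠ k then
      match fuel with
      | 0 => sum
      | Nat.succ n => pvLoopDown n (j - 1) k (sum + (j - 1))
    else sum

def getSequenceSum (i : Int) (j : Int) (k : Int) : Int :=
  pvLoopDown (j - k).toNat j k (pvLoopUp (j - i).toNat i j i)

-- ===== PORT B =====
def getSequenceSum_alt (i : Int) (j : Int) (k : Int) : Int :=
  PySem.Int.floordiv ((i + j) * (j - i + 1)) 2 + PySem.Int.floordiv ((k + j - 1) * (j - k)) 2

-- ===== PRECONDITION & SPEC =====
-- Pre_ excludes i > j or k > j, on which A's while-loops never terminate (Python diverges).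
def Pre_getSequenceSum (i : Int) (j : Int) (k : Int) : Prop := i ≤ j ∧ k ≤ j
instance (i : Int) (j : Int) (k : Int) : Decidable (Pre_getSequenceSum i j k) := by
  unfold Pre_getSequenceSum; infer_instance

def pvWitness_getSequenceSum : Int × Int × Int := (2, 5, 1)

def Spec_getSequenceSum (i : Int) (j : Int) (k : Int) (out : Int) : Prop := out = getSequenceSum_alt i j k
instance (i : Int) (j : Int) (k : Int) (out : Int) : Decidable (Spec_getSequenceSum i j k out) := by
  unfold Spec_getSequenceSum; infer_instance

-- ===== CLAIM (what is proved, stated in full; the proofs are below) =====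
def Claim_equal_getSequenceSum : Prop := ∀ (i : Int) (j : Int) (k : Int), Dom_getSequenceSum i j k → Pre_getSequenceSum i j k → Spec_getSequenceSum i j k (getSequenceSum i j k)

-- ===== LEMMAS AND PROOFS =====

theorem pvLoopUp_eq (n : Nat) : ∀ (i s : Int),
    2 * pvLoopUp n i (i + n) s = 2 * s + 2 * n * i + n * (n + 1) := by
  induction n with
  | zero => intro i s; simp [pvLoopUp]
  | succ n ih =>
    intro i s
    have hne : i ≠ i + ((n : Int) + 1) := by omega
    rw [pvLoopUp]
    push_cast
    simp only [hne, if_pos, ne_eq, not_false_eq_true]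
    have : i + ((n : Int) + 1) = (i + 1) + (n : Int) := by ring
    rw [this]
    have := ih (i + 1) (s + (i + 1))
    push_cast at this
    rw [this]; ring

theorem pvLoopDown_eq (m : Nat) : ∀ (j s : Int),
    2 * pvLoopDown m j (j - m) s = 2 * s + 2 * m * j - m * (m + 1) := by
  induction m with
  | zero => intro j s; simp [pvLoopDown]
  | succ m ih =>
    intro j s
    have hne : j ≠ j - ((m : Int) + 1) := by omega
    rw [pvLoopDown]
    push_cast
    simp only [hne, if_pos, ne_eq, not_false_eq_true]
    have : j - ((m : Int) + 1) = (j - 1) - (m : Int) := by ring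
    rw [this]
    have := ih (j - 1) (s + (j - 1))
    push_cast at this
    rw [this]; ring

theorem pv_fdiv_half (x a : Int) (h : x = 2 * a) : PySem.Int.floordiv x 2 = a := by
  subst h
  rw [PySem.Int.floordiv_eq_ediv_of_pos (by norm_num)]
  omega

theorem getSequenceSum_spec : Claim_equal_getSequenceSum := by
  unfold Claim_equal_getSequenceSum
  intro i j k _ hpre
  obtain ⟨hij, hkj⟩ := hpre
  unfold Spec_getSequenceSum getSequenceSum getSequenceSum_alt
  set n : Nat := (j - i).toNat with hn
  set m : Nat := (j - k).toNat with hm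
  have hjn : j = i + (n : Int) := by simp [hn]; omega
  have hjm : k = j - (m : Int) := by simp [hm]; omega
  -- value of A
  have hA2 : 2 * pvLoopDown m j k (pvLoopUp n i j i)
      = 2 * i + 2 * n * i + n * (n + 1) + 2 * m * j - m * (m + 1) := by
    have hup := pvLoopUp_eq n i i
    rw [← hjn] at hup
    have hdn := pvLoopDown_eq m j (pvLoopUp n i j i)
    rw [← hjm] at hdn
    rw [hdn, hup]
  -- value of B: each product is even; floordiv is exact halving
  have hdv1 : 2 ∣ (i + j) * (j - i + 1) := by
    rcases (by omega : (2:Int) ∣ (i + j) ∨ (2:Int) ∣ (j - i + 1)) with h | h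
    · exact h.mul_right _
    · exact h.mul_left _
  have hdv2 : 2 ∣ (k + j - 1) * (j - k) := by
    rcases (by omega : (2:Int) ∣ (k + j - 1) ∨ (2:Int) ∣ (j - k)) with h | h
    · exact h.mul_right _
    · exact h.mul_left _
  obtain ⟨c, hc⟩ := hdv1
  obtain ⟨d, hd⟩ := hdv2
  rw [pv_fdiv_half _ c hc, pv_fdiv_half _ d hd]
  have e1 : 2 * c = 2 * i + 2 * n * i + n * (n + 1) := by
    rw [← hc, hjn]; ring
  have e2 : 2 * d = 2 * m * j - m * (m + 1) := by
    rw [← hd, hjm]; ring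
  linarith [hA2, e1, e2]
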